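-- pv_equiv track=rewrite | github.com/MihirNaik2001/Augenblick-Consulting-LLP-solutions | q2_second_half.py | apply_cycle
-- ===== SOURCE A (Python) =====
-- def apply_cycle(input_array):
--
--     result_array = input_array
--     num_rows = len(input_array)
--     num_cols = len(input_array[0])
--     for col in range(num_cols):
--         upmost_index = 0
--         for row in range(num_rows):
--             if result_array[row][col] == 'O':
--                 result_array[upmost_index][col] = 'O'
--                 if upmost_index != row:
--                   result_array[row][col] = '.'
--                 upmost_index += 1
--             elif result_array[row][col] == '#':
--                 upmost_index = row + 1
--
--     for row in range(num_rows):
--         leftmost_index = 0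
--         for col in range(num_cols):
--             if result_array[row][col] == 'O':
--                 result_array[row][leftmost_index] = 'O'
--                 if leftmost_index != col:
--                     result_array[row][col] = '.'
--                 leftmost_index += 1
--             elif result_array[row][col] == '#':
--                 leftmost_index = col + 1
--
--     for col in range(num_cols):
--         downmost_index = num_rows - 1
--         for row in range(num_rows-1,-1,-1):
--             if result_array[row][col] == 'O':
--                 result_array[downmost_index][col] = 'O'
--                 if downmost_index != row:
--                     result_array[row][col] = '.'
--                 downmost_index -= 1
--             elif result_array[row][col] == '#':
--                 downmost_index = row - 1
--
--     for row in range(num_rows):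
--         rightmost_index = num_cols - 1
--         for col in range(num_cols-1,-1,-1):
--             if result_array[row][col] == 'O':
--                 result_array[row][rightmost_index] = 'O'
--                 if rightmost_index != col:
--                     result_array[row][col] = '.'
--                 rightmost_index -= 1
--             elif result_array[row][col] == '#':
--                 rightmost_index = col - 1
--
--     return result_array
-- ===== SOURCE B (Python) =====
-- # Equivalent reimplementation: tilt a 1-D line by segment grouping (count-and-fill per
-- # '#'-separated segment) applied to columns/rows in all four directions, mutating the
-- # same nested lists in place like the original (return value equivalence is what is proved).
-- def apply_cycle(input_array):
--     def tilt(line):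
--         out = []
--         seg = []
--         def flush():
--             k = sum(1 for c in seg if c == 'O')
--             out.extend(['O'] * k)
--             out.extend('.' if c == 'O' else c for c in seg[k:])
--         for c in line:
--             if c == '#':
--                 flush()
--                 out.append('#')
--                 seg = []
--             else:
--                 seg.append(c)
--         flush()
--         return out
--
--     n = len(input_array)
--     m = len(input_array[0])
--     # north: each column, top to bottom
--     for c in range(m):
--         new = tilt([input_array[r][c] for r in range(n)])
--         for r in range(n):
--             input_array[r][c] = new[r]
--     # west: each row, left to right
--     for r in range(n):
--         new = tilt([input_array[r][c] for c in range(m)])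
--         for c in range(m):
--             input_array[r][c] = new[c]
--     # south: each column, bottom to top
--     for c in range(m):
--         new = tilt([input_array[r][c] for r in range(n - 1, -1, -1)])
--         for r in range(n):
--             input_array[r][c] = new[n - 1 - r]
--     # east: each row, right to left
--     for r in range(n):
--         new = tilt([input_array[r][c] for c in range(m - 1, -1, -1)])
--         for c in range(m):
--             input_array[r][c] = new[m - 1 - c]
--     return input_array
-- ===== Notes on version B (the rewrite author's own statement) =====
-- stated objective: simpler
-- what changed: Replaces the four in-place free-pointer packing loops by one 1-D 'tilt' helper that splits a line into '#'-separated segments, counts the 'O's per segment and fills count-first (preserving non-'O' characters in vacated cells), applied to columns/rows in the four directions with explicit read/write-back; same in-place mutation of the nested lists.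
import Mathlib
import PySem

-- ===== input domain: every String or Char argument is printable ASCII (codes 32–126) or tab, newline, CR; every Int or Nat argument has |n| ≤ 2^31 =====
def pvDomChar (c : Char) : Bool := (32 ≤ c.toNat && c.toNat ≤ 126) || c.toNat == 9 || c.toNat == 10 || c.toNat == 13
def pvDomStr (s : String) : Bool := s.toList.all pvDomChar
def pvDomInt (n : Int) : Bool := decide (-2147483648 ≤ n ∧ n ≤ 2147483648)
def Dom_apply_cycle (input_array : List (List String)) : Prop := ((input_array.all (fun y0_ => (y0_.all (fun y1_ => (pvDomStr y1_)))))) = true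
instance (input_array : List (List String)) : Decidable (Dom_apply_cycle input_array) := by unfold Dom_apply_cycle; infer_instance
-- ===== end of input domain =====

-- B tilts each line by segment counting instead of A's in-place free-pointer packing; same
-- in-place mutation of the nested lists in Python, equal return value (objective: simpler).

-- ===== PORT A =====
-- result_array[r][c] read / write-one-cell (indices are in range on every executed access under Pre_)
def pvGet (g : List (List String)) (r c : Nat) : String := (g.getD r []).getD c ""
def pvSet (g : List (List String)) (r c : Nat) (v : String) : List (List String) :=
  g.set r ((g.getD r []).set c v)

-- the four inner loop bodies of A, named; 'range(k-1,-1,-1)' is ported as (List.range k).reverse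
def aStepN (col : Nat) (st : List (List String) × Nat) (row : Nat) : List (List String) × Nat :=
  if pvGet st.1 row col == "O" then
    let g' := pvSet st.1 st.2 col "O"
    (if st.2 ≠ row then pvSet g' row col "." else g', st.2 + 1)
  else if pvGet st.1 row col == "#" then (st.1, row + 1)
  else st

def aStepW (row : Nat) (st : List (List String) × Nat) (col : Nat) : List (List String) × Nat :=
  if pvGet st.1 row col == "O" then
    let g' := pvSet st.1 row st.2 "O"
    (if st.2 ≠ col then pvSet g' row col "." else g', st.2 + 1)
  else if pvGet st.1 row col == "#" then (st.1, col + 1)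
  else st

def aStepS (col : Nat) (st : List (List String) × Int) (row : Nat) : List (List String) × Int :=
  if pvGet st.1 row col == "O" then
    let g' := pvSet st.1 st.2.toNat col "O"   -- downmost_index ≥ 0 whenever this line executes
    (if st.2 ≠ (row : Int) then pvSet g' row col "." else g', st.2 - 1)
  else if pvGet st.1 row col == "#" then (st.1, (row : Int) - 1)
  else st

def aStepE (row : Nat) (st : List (List String) × Int) (col : Nat) : List (List String) × Int :=
  if pvGet st.1 row col == "O" then
    let g' := pvSet st.1 row st.2.toNat "O"   -- rightmost_index ≥ 0 whenever this line executes
    (if st.2 ≠ (col : Int) then pvSet g' row col "." else g', st.2 - 1)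
  else if pvGet st.1 row col == "#" then (st.1, (col : Int) - 1)
  else st

def apply_cycle (input_array : List (List String)) : List (List String) :=
  let num_rows := input_array.length
  let num_cols := (input_array.getD 0 []).length
  let g1 := (List.range num_cols).foldl (fun g col =>
    ((List.range num_rows).foldl (aStepN col) (g, 0)).1) input_array
  let g2 := (List.range num_rows).foldl (fun g row =>
    ((List.range num_cols).foldl (aStepW row) (g, 0)).1) g1
  let g3 := (List.range num_cols).foldl (fun g col =>
    (((List.range num_rows).reverse).foldl (aStepS col) (g, (num_rows : Int) - 1)).1) g2
  let g4 := (List.range num_rows).foldl (fun g row =>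
    (((List.range num_cols).reverse).foldl (aStepE row) (g, (num_cols : Int) - 1)).1) g3
  g4

-- ===== PORT B =====
-- flush(): emit the pending segment, 'O'-count first, then the vacated tail
def pvFlush (out seg : List String) : List String :=
  let k := (seg.filter (fun c => c == "O")).length
  out ++ List.replicate k "O" ++ (seg.drop k).map (fun c => if c == "O" then "." else c)

def pvTiltStep (st : List String × List String) (c : String) : List String × List String :=
  if c == "#" then (pvFlush st.1 st.2 ++ ["#"], [])
  else (st.1, st.2 ++ [c])

def pvTilt (line : List String) : List String :=
  let st := line.foldl pvTiltStep ([], [])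
  pvFlush st.1 st.2

-- read a column/row prefix, write one back cell by cell (Source B's comprehensions and write loops)
def pvReadCol (n c : Nat) (g : List (List String)) : List String :=
  (List.range n).map (fun r => pvGet g r c)
def pvWriteCol (n c : Nat) (v : Nat → String) (g : List (List String)) : List (List String) :=
  (List.range n).foldl (fun g r => pvSet g r c (v r)) g
def pvWriteRow (m r : Nat) (v : Nat → String) (g : List (List String)) : List (List String) :=
  (List.range m).foldl (fun g c => pvSet g r c (v c)) g

def apply_cycle_alt (input_array : List (List String)) : List (List String) :=
  let n := input_array.length
  let m := (input_array.getD 0 []).length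
  let g1 := (List.range m).foldl (fun g c =>
    let new := pvTilt (pvReadCol n c g)
    pvWriteCol n c (fun r => new.getD r "") g) input_array
  let g2 := (List.range n).foldl (fun g r =>
    let new := pvTilt ((List.range m).map (fun c => pvGet g r c))
    pvWriteRow m r (fun c => new.getD c "") g) g1
  let g3 := (List.range m).foldl (fun g c =>
    let new := pvTilt (((List.range n).reverse).map (fun r => pvGet g r c))
    pvWriteCol n c (fun r => new.getD (n - 1 - r) "") g) g2
  let g4 := (List.range n).foldl (fun g r =>
    let new := pvTilt (((List.range m).reverse).map (fun c => pvGet g r c))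
    pvWriteRow m r (fun c => new.getD (m - 1 - c) "") g) g3
  g4

-- ===== PRECONDITION & SPEC =====
-- exactly A's normal-return domain: A raises IndexError on the empty grid (it reads row 0) and
-- whenever some row is shorter than row 0 (every cell with a column index below len(row 0) is read);
-- B raises on the same inputs
def Pre_apply_cycle (input_array : List (List String)) : Prop :=
  input_array ≠ [] ∧ ∀ row ∈ input_array, (input_array.getD 0 []).length ≤ row.length
instance (input_array : List (List String)) : Decidable (Pre_apply_cycle input_array) := by
  unfold Pre_apply_cycle; infer_instance

def pvWitness_apply_cycle : List (List String) :=
  [["O", ".", "#", "O"], [".", "O", "O", "."], ["#", ".", "O", "x"]]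

def Spec_apply_cycle (input_array : List (List String)) (out : List (List String)) : Prop := out = apply_cycle_alt input_array
instance (input_array : List (List String)) (out : List (List String)) : Decidable (Spec_apply_cycle input_array out) := by unfold Spec_apply_cycle; infer_instance

-- ===== CLAIM (what is proved, stated in full; the proofs are below) =====
def Claim_equal_apply_cycle : Prop := ∀ (input_array : List (List String)), Dom_apply_cycle input_array → Pre_apply_cycle input_array → Spec_apply_cycle input_array (apply_cycle input_array)

-- ===== LEMMAS AND PROOFS =====

-- ---------- generic getD / set helpers ----------
lemma pv_getD_set_self {α : Type} (l : List α) (i : Nat) (v d : α) (h : i < l.length) :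
    (l.set i v).getD i d = v := by
  rw [List.getD_eq_getElem _ _ (by simpa using h)]
  simp

lemma pv_getD_set_ne {α : Type} (l : List α) (i j : Nat) (v d : α) (h : i ≠ j) :
    (l.set i v).getD j d = l.getD j d := by
  by_cases hj : j < l.length
  · rw [List.getD_eq_getElem _ _ (by simpa using hj), List.getD_eq_getElem _ _ hj]
    exact List.getElem_set_ne h (by simpa using hj)
  · rw [List.getD_eq_default _ _ (by simpa using Nat.le_of_not_lt hj),
        List.getD_eq_default _ _ (Nat.le_of_not_lt hj)]

lemma pv_set_getD_self {α : Type} (l : List α) (i : Nat) (d : α) (h : i < l.length) :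
    l.set i (l.getD i d) = l := by
  rw [List.getD_eq_getElem _ _ h]; exact List.set_getElem_self h

lemma pv_getD_append_left {α : Type} (l m : List α) (i : Nat) (d : α) (h : i < l.length) :
    (l ++ m).getD i d = l.getD i d := by
  simp [List.getD_eq_getElem?_getD, List.getElem?_append_left h]

lemma pv_getD_append_right {α : Type} (l m : List α) (i : Nat) (d : α) (h : l.length ≤ i) :
    (l ++ m).getD i d = m.getD (i - l.length) d := by
  simp [List.getD_eq_getElem?_getD, List.getElem?_append_right h]

lemma pv_getD_reverse {α : Type} (l : List α) (i : Nat) (d : α) (h : i < l.length) :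
    l.reverse.getD i d = l.getD (l.length - 1 - i) d := by
  rw [List.getD_eq_getElem _ _ (by simpa using h), List.getD_eq_getElem _ _ (by omega)]
  rw [List.getElem_reverse]

lemma pv_reverse_set {α : Type} (l : List α) (i : Nat) (v : α) (h : i < l.length) :
    l.reverse.set i v = (l.set (l.length - 1 - i) v).reverse := by
  apply List.ext_getElem (by simp)
  intro j h1 h2
  simp only [List.length_set, List.length_reverse] at h1 h2
  rw [List.getElem_reverse]
  simp only [List.length_set]
  by_cases hj : j = i
  · subst hj
    rw [List.getElem_set_self (by simpa using h), List.getElem_set_self (by simp; omega)]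
  · rw [List.getElem_set_ne (Ne.symm hj) (by simpa using h1),
        List.getElem_set_ne (show l.length - 1 - i ≠ l.length - 1 - j by omega) (by simp; omega),
        List.getElem_reverse]

lemma pv_grid_ext {g1 g2 : List (List String)} (hl : g1.length = g2.length)
    (h : ∀ i, i < g1.length → g1.getD i [] = g2.getD i []) : g1 = g2 := by
  apply List.ext_getElem hl
  intro i h1 h2
  have := h i h1
  rwa [List.getD_eq_getElem _ _ h1, List.getD_eq_getElem _ _ h2] at this

lemma pv_map_range_getD (l : List String) (k : Nat) (h : k ≤ l.length) :
    (List.range k).map (fun i => l.getD i "") = l.take k := by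
  apply List.ext_getElem (by simp; omega)
  intro i h1 h2
  simp only [List.getElem_map, List.getElem_range, List.getElem_take]
  rw [List.getD_eq_getElem _ _ (by simp at h1; omega)]

lemma pv_map_eq_of_getD (new : List String) (k : Nat) (v : Nat → String)
    (hl : new.length = k) (h : ∀ i, i < k → v i = new.getD i "") :
    (List.range k).map v = new := by
  apply List.ext_getElem (by simp [hl])
  intro i h1 h2
  simp only [List.getElem_map, List.getElem_range]
  rw [h i (by simpa using h1), List.getD_eq_getElem _ _ h2]
-- ---------- pvSet pointwise ----------
lemma pvSet_length (g : List (List String)) (r c : Nat) (v : String) :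
    (pvSet g r c v).length = g.length := by simp [pvSet]

lemma pvSet_getD_self (g : List (List String)) (r c : Nat) (v : String) (h : r < g.length) :
    (pvSet g r c v).getD r [] = (g.getD r []).set c v := pv_getD_set_self _ _ _ _ h

lemma pvSet_getD_ne (g : List (List String)) (r c i : Nat) (v : String) (h : r ≠ i) :
    (pvSet g r c v).getD i [] = g.getD i [] := pv_getD_set_ne _ _ _ _ _ h

lemma pvSet_rowlen (g : List (List String)) (r c : Nat) (v : String) (i : Nat) :
    ((pvSet g r c v).getD i []).length = (g.getD i []).length := by
  by_cases hi : i = r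
  · subst hi
    by_cases h : i < g.length
    · rw [pvSet_getD_self _ _ _ _ h]; simp
    · unfold pvSet; rw [List.set_eq_of_length_le (Nat.le_of_not_lt h)]
  · rw [pvSet_getD_ne _ _ _ _ _ (fun e => hi e.symm)]

-- shape of a grid: n rows, every row at least m cells
def GShape (g : List (List String)) (n m : Nat) : Prop :=
  g.length = n ∧ ∀ i, i < n → m ≤ (g.getD i []).length

lemma GShape_pvSet {g : List (List String)} {n m : Nat} (hg : GShape g n m) (r c : Nat) (v : String) :
    GShape (pvSet g r c v) n m :=
  ⟨by rw [pvSet_length]; exact hg.1, fun i hi => by rw [pvSet_rowlen]; exact hg.2 i hi⟩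

-- ---------- pvWriteCol pointwise ----------
lemma pvWriteCol_succ (n c : Nat) (v : Nat → String) (g : List (List String)) :
    pvWriteCol (n + 1) c v g = pvSet (pvWriteCol n c v g) n c (v n) := by
  simp [pvWriteCol, List.range_succ]

lemma pvWriteCol_length (n c : Nat) (v : Nat → String) (g : List (List String)) :
    (pvWriteCol n c v g).length = g.length := by
  induction n with
  | zero => simp [pvWriteCol]
  | succ n ih => rw [pvWriteCol_succ, pvSet_length, ih]

lemma pvWriteCol_getD (n c : Nat) (v : Nat → String) (g : List (List String)) (i : Nat) :
    (pvWriteCol n c v g).getD i [] =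
      if i < n ∧ i < g.length then (g.getD i []).set c (v i) else g.getD i [] := by
  induction n with
  | zero => simp [pvWriteCol]
  | succ n ih =>
    rw [pvWriteCol_succ]
    by_cases hi : i = n
    · subst hi
      by_cases h : i < g.length
      · rw [pvSet_getD_self _ _ _ _ (by rw [pvWriteCol_length]; exact h), ih]
        simp [h]
      · unfold pvSet
        rw [List.set_eq_of_length_le (by rw [pvWriteCol_length]; exact Nat.le_of_not_lt h), ih]
        simp [h]
    · rw [pvSet_getD_ne _ _ _ _ _ (fun e => hi e.symm), ih]
      have : (i < n ∧ i < g.length) ↔ (i < n + 1 ∧ i < g.length) := by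
        constructor <;> (rintro ⟨a, b⟩; exact ⟨by omega, b⟩)
      rw [if_congr this rfl rfl]

lemma pvWriteCol_congr {n c : Nat} {v w : Nat → String} (g : List (List String))
    (h : ∀ r, r < n → v r = w r) : pvWriteCol n c v g = pvWriteCol n c w g := by
  apply pv_grid_ext (by rw [pvWriteCol_length, pvWriteCol_length])
  intro i hi
  rw [pvWriteCol_length] at hi
  rw [pvWriteCol_getD, pvWriteCol_getD]
  by_cases h1 : i < n
  · simp only [h1, hi, and_self, if_true, h i h1]
  · simp [h1]

lemma GShape_pvWriteCol {g : List (List String)} {n m : Nat} (hg : GShape g n m)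
    (nn c : Nat) (v : Nat → String) : GShape (pvWriteCol nn c v g) n m := by
  refine ⟨by rw [pvWriteCol_length]; exact hg.1, fun i hi => ?_⟩
  rw [pvWriteCol_getD]
  split
  · simpa using hg.2 i hi
  · exact hg.2 i hi

-- P0: writing a column back onto itself is the identity
lemma pvWriteCol_read {g : List (List String)} {n m c : Nat} (hg : GShape g n m) (hc : c < m) :
    pvWriteCol n c (fun r => pvGet g r c) g = g := by
  apply pv_grid_ext (by rw [pvWriteCol_length])
  intro i hi
  rw [pvWriteCol_length] at hi
  rw [pvWriteCol_getD]
  by_cases h1 : i < n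
  · simp only [h1, hi, and_self, if_true]
    exact pv_set_getD_self _ _ _ (lt_of_lt_of_le hc (hg.2 i h1))
  · simp [h1]

-- P1: reading cell (r,c) of a written column
lemma pvGet_pvWriteCol {g : List (List String)} {n m c : Nat} (hg : GShape g n m) (hc : c < m)
    (l : List String) (_hl : l.length = n) (r : Nat) (hr : r < n) :
    pvGet (pvWriteCol n c (fun i => l.getD i "") g) r c = l.getD r "" := by
  unfold pvGet
  rw [pvWriteCol_getD]
  simp only [hr, hg.1, and_self, if_true]
  exact pv_getD_set_self _ _ _ _ (lt_of_lt_of_le hc (hg.2 r hr))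

-- P2: a single cell write into a written column updates the column values
lemma pvSet_pvWriteCol {g : List (List String)} {n m c : Nat} (hg : GShape g n m) (_hc : c < m)
    (l : List String) (hl : l.length = n) (r : Nat) (w : String) :
    pvSet (pvWriteCol n c (fun i => l.getD i "") g) r c w
      = pvWriteCol n c (fun i => (l.set r w).getD i "") g := by
  apply pv_grid_ext (by rw [pvSet_length, pvWriteCol_length, pvWriteCol_length])
  intro i hi
  rw [pvSet_length, pvWriteCol_length] at hi
  by_cases hir : i = r
  · subst hir
    have hin : i < n := by rw [← hg.1]; exact hi
    rw [pvSet_getD_self _ _ _ _ (by rw [pvWriteCol_length]; exact hi)]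
    rw [pvWriteCol_getD, pvWriteCol_getD]
    simp only [hin, hi, and_self, if_true, List.set_set]
    rw [pv_getD_set_self _ _ _ _ (by rw [hl]; exact hin)]
  · rw [pvSet_getD_ne _ _ _ _ _ (fun e => hir e.symm), pvWriteCol_getD, pvWriteCol_getD]
    rw [pv_getD_set_ne _ _ _ _ _ (fun e => hir e.symm)]
-- ---------- 1-D line versions of A's packing loops ----------
def lineAsc (st : List String × Nat) (r : Nat) : List String × Nat :=
  if st.1.getD r "" == "O" then
    let l2 := st.1.set st.2 "O"
    (if st.2 ≠ r then l2.set r "." else l2, st.2 + 1)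
  else if st.1.getD r "" == "#" then (st.1, r + 1)
  else st

def lineDesc (st : List String × Int) (r : Nat) : List String × Int :=
  if st.1.getD r "" == "O" then
    let l2 := st.1.set st.2.toNat "O"
    (if st.2 ≠ (r : Int) then l2.set r "." else l2, st.2 - 1)
  else if st.1.getD r "" == "#" then (st.1, (r : Int) - 1)
  else st

def countO (seg : List String) : Nat := (seg.filter (fun c => c == "O")).length

lemma countO_le (seg : List String) : countO seg ≤ seg.length := List.length_filter_le _ _

lemma pvFlush_eq (out seg : List String) : pvFlush out seg = out ++ pvFlush [] seg := by
  simp [pvFlush]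

lemma pvFlush_length (out seg : List String) :
    (pvFlush out seg).length = out.length + seg.length := by
  have := countO_le seg
  simp only [pvFlush, List.length_append, List.length_replicate, List.length_map,
    List.length_drop]
  unfold countO at this
  omega

lemma tiltFold_length : ∀ (l : List String) (st : List String × List String),
    ((l.foldl pvTiltStep st).1.length + (l.foldl pvTiltStep st).2.length)
      = st.1.length + st.2.length + l.length := by
  intro l
  induction l with
  | nil => intro st; simp
  | cons x xs ih =>
    intro st
    simp only [List.foldl_cons]
    rw [ih]
    unfold pvTiltStep
    by_cases hx : x = "#" <;> simp [hx, pvFlush_length] <;> omega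

lemma pvTilt_length (l : List String) : (pvTilt l).length = l.length := by
  unfold pvTilt
  rw [pvFlush_length]
  simpa using tiltFold_length l ([], [])

-- the closed form of pvFlush [] seg used in the invariant
lemma pvFlush_nil (seg : List String) :
    pvFlush [] seg = List.replicate (countO seg) "O"
      ++ (seg.drop (countO seg)).map (fun c => if c == "O" then "." else c) := by
  simp [pvFlush, countO]

lemma countO_append_O (seg : List String) : countO (seg ++ ["O"]) = countO seg + 1 := by
  simp [countO]

lemma countO_append_other (seg : List String) (x : String) (hx : x ≠ "O") :
    countO (seg ++ [x]) = countO seg := by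
  simp [countO, hx]

-- THE 1-D invariant: A's ascending packing loop over the first i cells produces exactly
-- B's flushed output-so-far ++ flush of the pending segment ++ the untouched tail,
-- with the free pointer sitting at (flushed length + #O in the pending segment).
lemma ascInv (l : List String) : ∀ (i : Nat), i ≤ l.length →
    (List.range i).foldl lineAsc (l, 0)
      = (((l.take i).foldl pvTiltStep ([], [])).1
           ++ pvFlush [] ((l.take i).foldl pvTiltStep ([], [])).2
           ++ l.drop i,
         ((l.take i).foldl pvTiltStep ([], [])).1.length
           + countO ((l.take i).foldl pvTiltStep ([], [])).2) := by
  intro i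
  induction i with
  | zero => simp [pvFlush, countO]
  | succ i ih =>
    intro hi
    have hi' : i < l.length := by omega
    obtain ⟨out, seg, hst⟩ : ∃ out seg, (l.take i).foldl pvTiltStep ([], []) = (out, seg) :=
      ⟨_, _, rfl⟩
    have hlen : out.length + seg.length = i := by
      have := tiltFold_length (l.take i) ([], [])
      rw [hst] at this
      simpa [Nat.min_eq_left (le_of_lt hi')] using this
    have htake : l.take (i + 1) = l.take i ++ [l[i]] := by
      rw [List.take_add_one]
      simp [List.getElem?_eq_getElem hi']
    have hfold1 : (l.take (i+1)).foldl pvTiltStep ([], [])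
        = pvTiltStep (out, seg) l[i] := by
      rw [htake, List.foldl_append, hst]; rfl
    have hdrop : l.drop i = l[i] :: l.drop (i+1) := List.drop_eq_getElem_cons hi'
    rw [List.range_succ, List.foldl_append, ih (le_of_lt hi'), hst]
    simp only []
    -- the cell read in step i is the original cell l[i]
    have hflen : (pvFlush [] seg).length = seg.length := by
      simpa using pvFlush_length [] seg
    have hread : (out ++ pvFlush [] seg ++ l.drop i).getD i "" = l[i] := by
      rw [List.append_assoc, pv_getD_append_right _ _ _ _ (by omega), hdrop]
      have : i - out.length - (pvFlush [] seg).length = 0 := by omega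
      rw [pv_getD_append_right _ _ _ _ (by omega), this]
      rfl
    rw [hfold1]
    have hkle := countO_le seg
    have hjunction : ∀ (a b : List String) (x v : String), a.length = i →
        (a ++ x :: b).set i v = a ++ v :: b := by
      intro a b x v ha
      rw [List.set_append_right _ _ (by omega), ha, Nat.sub_self, List.set_cons_zero]
    by_cases hO : l[i] = "O"
    · -- an 'O' rolls to the free pointer, its old cell is vacated
      have hX : pvTiltStep (out, seg) l[i] = (out, seg ++ ["O"]) := by
        simp [pvTiltStep, hO]
      rw [hX]
      by_cases hks : (countO seg) < seg.length
      · have hui : out.length + (countO seg) ≠ i := by omega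
        have hL : List.foldl lineAsc (out ++ pvFlush [] seg ++ l.drop i, out.length + (countO seg)) [i]
            = (((out ++ pvFlush [] seg ++ l.drop i).set (out.length + (countO seg)) "O").set i ".",
               out.length + (countO seg) + 1) := by
          simp only [List.foldl_cons, List.foldl_nil, lineAsc, hread, hO]
          simp [hui]
        rw [hL]
        have e1 : (out ++ pvFlush [] seg ++ l.drop i).set (out.length + (countO seg)) "O"
            = out ++ (List.replicate (countO seg) "O" ++ "O" :: (seg.drop (countO seg + 1)).map (fun c => if c == "O" then "." else c)) ++ l.drop i := by
          rw [List.append_assoc]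
          rw [List.set_append_right _ _ (by omega), Nat.add_sub_cancel_left]
          rw [List.set_append_left _ _ (by rw [hflen]; exact hks)]
          rw [pvFlush_nil]
          rw [List.set_append_right _ _ (by simp)]
          rw [List.drop_eq_getElem_cons hks]
          simp [List.map_drop]
          rw [List.drop_eq_getElem_cons (i := countO seg)
                (l := seg.map (fun c => if c = "O" then "." else c)) (by simpa using hks),
              List.set_cons_zero]
          simp
        have e2 : (out ++ (List.replicate (countO seg) "O" ++ "O" :: (seg.drop (countO seg + 1)).map (fun c => if c == "O" then "." else c)) ++ l.drop i).set i "."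
            = out ++ (List.replicate (countO seg) "O" ++ "O" :: (seg.drop (countO seg + 1)).map (fun c => if c == "O" then "." else c)) ++ ("." :: l.drop (i+1)) := by
          rw [hdrop, ← List.append_assoc]
          exact hjunction _ _ _ _ (by simp; omega)
        refine Prod.ext ?_ ?_
        · show _ = _
          rw [e1, e2, pvFlush_nil, countO_append_O,
              List.drop_append_of_le_length (by omega), List.replicate_succ']
          simp [List.append_assoc]
        · show out.length + countO seg + 1 = out.length + countO (seg ++ ["O"])
          rw [countO_append_O]
          omega
      · have hk : (countO seg) = seg.length := by omega
        have hui : out.length + (countO seg) = i := by omega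
        have hL : List.foldl lineAsc (out ++ pvFlush [] seg ++ l.drop i, out.length + (countO seg)) [i]
            = ((out ++ pvFlush [] seg ++ l.drop i).set i "O", out.length + (countO seg) + 1) := by
          simp only [List.foldl_cons, List.foldl_nil, lineAsc, hread, hO]
          simp [hui]
        rw [hL]
        have e1 : (out ++ pvFlush [] seg ++ l.drop i).set i "O"
            = out ++ pvFlush [] seg ++ ("O" :: l.drop (i+1)) := by
          rw [hdrop, hjunction _ _ _ _ (by simp [hflen]; omega)]
        refine Prod.ext ?_ ?_
        · show _ = _
          rw [e1, pvFlush_nil, pvFlush_nil, countO_append_O, hk]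
          simp [List.replicate_succ', List.append_assoc]
        · show out.length + countO seg + 1 = out.length + countO (seg ++ ["O"])
          rw [countO_append_O]
          omega
    · by_cases hH : l[i] = "#"
      · have hX : pvTiltStep (out, seg) l[i] = (pvFlush out seg ++ ["#"], []) := by
          simp [pvTiltStep, hH]
        rw [hX]
        have hL : List.foldl lineAsc (out ++ pvFlush [] seg ++ l.drop i, out.length + (countO seg)) [i]
            = (out ++ pvFlush [] seg ++ l.drop i, i + 1) := by
          simp only [List.foldl_cons, List.foldl_nil, lineAsc, hread, hH]
          simp
        rw [hL]
        refine Prod.ext ?_ ?_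
        · show _ = _
          rw [pvFlush_eq out seg, hdrop, hH]
          simp [pvFlush, List.append_assoc]
        · show i + 1 = (pvFlush out seg ++ ["#"]).length + countO []
          simp [pvFlush_length, countO]
          omega
      · have hX : pvTiltStep (out, seg) l[i] = (out, seg ++ [l[i]]) := by
          simp [pvTiltStep, hH]
        rw [hX]
        have hO' : (l[i] == "O") = false := by simpa using hO
        have hL : List.foldl lineAsc (out ++ pvFlush [] seg ++ l.drop i, out.length + (countO seg)) [i]
            = (out ++ pvFlush [] seg ++ l.drop i, out.length + (countO seg)) := by
          simp only [List.foldl_cons, List.foldl_nil, lineAsc, hread]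
          simp [hO, hH]
        rw [hL]
        refine Prod.ext ?_ ?_
        · show out ++ pvFlush [] seg ++ l.drop i
              = out ++ pvFlush [] (seg ++ [l[i]]) ++ l.drop (i + 1)
          rw [pvFlush_nil, pvFlush_nil, countO_append_other _ _ hO,
              List.drop_append_of_le_length (by omega), hdrop]
          simp [List.append_assoc]
          rw [hdrop]
          simp [hO]
        · show out.length + countO seg = out.length + countO (seg ++ [l[i]])
          rw [countO_append_other _ _ hO]
-- A's ascending 1-D pass over the first mm cells = B's tilt of the prefix, tail untouched
lemma asc_result (l : List String) (mm : Nat) (h : mm ≤ l.length) :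
    ((List.range mm).foldl lineAsc (l, 0)).1 = pvTilt (l.take mm) ++ l.drop mm := by
  rw [ascInv l mm h]
  show _ ++ _ ++ _ = _
  rw [show pvTilt (l.take mm)
        = (List.foldl pvTiltStep ([], []) (l.take mm)).1
            ++ pvFlush [] (List.foldl pvTiltStep ([], []) (l.take mm)).2 from pvFlush_eq _ _]

-- A's descending pass is the ascending pass on the reversed line
lemma descAsc (n : Nat) : ∀ (kk : Nat) (l : List String), l.length = n → ∀ (u : Nat), u + kk ≤ n →
    ((List.range kk).reverse).foldl lineDesc (l, (n : Int) - 1 - u)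
      = (((List.range' (n - kk) kk).foldl lineAsc (l.reverse, u)).1.reverse,
         (n : Int) - 1 - (((List.range' (n - kk) kk).foldl lineAsc (l.reverse, u)).2 : Int)) := by
  intro kk
  induction kk with
  | zero => intro l hl u hu; simp
  | succ kk ih =>
    intro l hl u hu
    have hkn : kk < n := by omega
    have hun : u < n := by omega
    have hrev : (List.range (kk+1)).reverse = kk :: (List.range kk).reverse := by
      rw [List.range_succ, List.reverse_append]
      simp
    have hrange' : List.range' (n - (kk+1)) (kk+1) = (n - kk - 1) :: List.range' (n - kk) kk := by
      rw [List.range'_succ, show n - (kk+1) = n - kk - 1 from by omega,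
          show n - kk - 1 + 1 = n - kk from by omega]
    rw [hrev, hrange', List.foldl_cons, List.foldl_cons]
    -- the two step functions correspond under reversal
    have hread : l.reverse.getD (n - kk - 1) "" = l.getD kk "" := by
      rw [pv_getD_reverse _ _ _ (by omega)]
      congr 1
      omega
    have hstep : lineDesc (l, (n : Int) - 1 - u) kk
        = ((lineAsc (l.reverse, u) (n - kk - 1)).1.reverse,
           (n : Int) - 1 - ((lineAsc (l.reverse, u) (n - kk - 1)).2 : Int)) := by
      unfold lineDesc lineAsc
      rw [hread]
      by_cases hO : l.getD kk "" = "O"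
      · simp only [hO, show (("O":String) == "O") = true from rfl, if_true]
        have htn : ((n : Int) - 1 - u).toNat = n - 1 - u := by omega
        have hset1 : l.reverse.set u "O" = (l.set (n - 1 - u) "O").reverse := by
          rw [pv_reverse_set _ _ _ (by omega)]
          have e : l.length - 1 - u = n - 1 - u := by omega
          rw [e]
        have hcond : ((n : Int) - 1 - u ≠ (kk : Int)) ↔ (u ≠ n - kk - 1) := by omega
        by_cases hc : u = n - kk - 1
        · have : ¬ ((n : Int) - 1 - u ≠ (kk : Int)) := by omega
          simp only [if_neg this, if_neg (by omega : ¬ u ≠ n - kk - 1)]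
          refine Prod.ext ?_ ?_
          · show l.set (((n:Int) - 1 - u).toNat) "O" = _
            rw [htn, hset1, List.reverse_reverse]
          · show (n : Int) - 1 - u - 1 = (n : Int) - 1 - ((u + 1 : Nat) : Int)
            push_cast; ring
        · simp only [if_pos (by omega : (n : Int) - 1 - u ≠ (kk : Int)), if_pos hc]
          refine Prod.ext ?_ ?_
          · show ((l.set (((n:Int) - 1 - u).toNat) "O").set kk ".") = _
            rw [htn, hset1]
            have : ((l.set (n - 1 - u) "O").reverse.set (n - kk - 1) ".") 
                = ((l.set (n - 1 - u) "O").set kk ".").reverse := by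
              rw [pv_reverse_set _ _ _ (by simp [hl]; omega)]
              simp only [List.length_set, hl]
              have e : n - 1 - (n - kk - 1) = kk := by omega
              rw [e]
            rw [this, List.reverse_reverse]
          · show (n : Int) - 1 - u - 1 = (n : Int) - 1 - ((u + 1 : Nat) : Int)
            push_cast; ring
      · by_cases hH : l.getD kk "" = "#"
        · simp only [hH, show (("#":String) == "O") = false from rfl, Bool.false_eq_true,
            if_false, show (("#":String) == "#") = true from rfl, if_true]
          refine Prod.ext ?_ ?_
          · show l = l.reverse.reverse
            rw [List.reverse_reverse]
          · show (kk : Int) - 1 = (n : Int) - 1 - ((n - kk - 1 + 1 : Nat) : Int)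
            omega
        · have h1 : (l.getD kk "" == "O") = false := by simpa using hO
          have h2 : (l.getD kk "" == "#") = false := by simpa using hH
          simp only [h1, h2, Bool.false_eq_true, if_false]
          refine Prod.ext ?_ ?_
          · show l = l.reverse.reverse
            rw [List.reverse_reverse]
          · rfl
    rw [hstep]
    -- apply the induction hypothesis to the updated line
    have hlen1 : (lineAsc (l.reverse, u) (n - kk - 1)).1.length = n := by
      have h' : (lineAsc (l.reverse, u) (n - kk - 1)).1.length = l.reverse.length := by
        unfold lineAsc; split_ifs <;> simp
      rw [h', List.length_reverse, hl]
    have hbound : (lineAsc (l.reverse, u) (n - kk - 1)).2 + kk ≤ n := by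
      unfold lineAsc; split_ifs <;> simp <;> omega
    rw [ih ((lineAsc (l.reverse, u) (n - kk - 1)).1.reverse)
          (by rw [List.length_reverse]; exact hlen1)
          ((lineAsc (l.reverse, u) (n - kk - 1)).2) hbound]
    rw [List.reverse_reverse]
-- A's descending pass over a whole line = reverse of tilt of the reversed line
lemma desc_result (l : List String) (n : Nat) (hl : l.length = n) :
    (((List.range n).reverse).foldl lineDesc (l, (n : Int) - 1)).1
      = (pvTilt l.reverse).reverse := by
  have h := descAsc n n l hl 0 (by omega)
  rw [show (n : Int) - 1 - (0 : Nat) = (n : Int) - 1 by push_cast; ring] at h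
  rw [h]
  rw [show List.range' (n - n) n = List.range n by
        rw [Nat.sub_self, ← List.range_eq_range']]
  rw [asc_result l.reverse n (by simp [hl])]
  rw [List.take_of_length_le (by simp [hl]), List.drop_of_length_le (by simp [hl])]
  simp

-- the descending pass over indices < mm only touches the first mm cells
lemma desc_append (mm : Nat) : ∀ (rs : List Nat), (∀ x ∈ rs, x < mm) →
    ∀ (l1 l2 : List String) (d : Int), l1.length = mm → d ≤ (mm : Int) - 1 →
    rs.foldl lineDesc (l1 ++ l2, d)
      = ((rs.foldl lineDesc (l1, d)).1 ++ l2, (rs.foldl lineDesc (l1, d)).2) := by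
  intro rs
  induction rs with
  | nil => intro _ l1 l2 d _ _; simp
  | cons r rs ih =>
    intro hmem l1 l2 d hl1 hd
    have hr : r < mm := hmem r (List.mem_cons_self)
    have hm1 : 1 ≤ mm := by omega
    simp only [List.foldl_cons]
    have hread : (l1 ++ l2).getD r "" = l1.getD r "" :=
      pv_getD_append_left _ _ _ _ (by omega)
    have hstep : lineDesc (l1 ++ l2, d) r
        = ((lineDesc (l1, d) r).1 ++ l2, (lineDesc (l1, d) r).2) := by
      unfold lineDesc
      rw [hread]
      by_cases hO : l1.getD r "" = "O"
      · simp only [hO, show (("O":String) == "O") = true from rfl, if_true]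
        have hset1 : (l1 ++ l2).set d.toNat "O" = l1.set d.toNat "O" ++ l2 :=
          List.set_append_left _ _ (by omega)
        by_cases hc : d ≠ (r : Int)
        · simp only [if_pos hc, hset1]
          refine Prod.ext ?_ ?_
          · show (l1.set d.toNat "O" ++ l2).set r "." = _
            rw [List.set_append_left _ _ (by simp [hl1]; omega)]
          · rfl
        · simp only [if_neg hc, hset1]
      · have h1 : (l1.getD r "" == "O") = false := by simpa using hO
        by_cases hH : l1.getD r "" = "#"
        · have h2 : (l1.getD r "" == "#") = true := by simpa using hH
          simp only [h1, h2, Bool.false_eq_true, if_false, if_true]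
        · have h2 : (l1.getD r "" == "#") = false := by simpa using hH
          simp only [h1, h2, Bool.false_eq_true, if_false]
    rw [hstep]
    have hlen : (lineDesc (l1, d) r).1.length = mm := by
      unfold lineDesc; split_ifs <;> simp [hl1]
    have hdle : (lineDesc (l1, d) r).2 ≤ (mm : Int) - 1 := by
      unfold lineDesc; split_ifs <;> simp <;> omega
    rw [ih (fun x hx => hmem x (List.mem_cons_of_mem _ hx)) _ l2 _ hlen hdle]

-- ---------- grid-level factoring ----------
-- A's north inner loop on column c, started on a grid whose column c holds the line l,
-- is the 1-D ascending pass on l written back into column c.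
lemma colFactorAsc {n m c : Nat} (g : List (List String)) (hg : GShape g n m) (hc : c < m) :
    ∀ (rs : List Nat), (∀ x ∈ rs, x < n) → ∀ (l : List String) (u : Nat), l.length = n →
    rs.foldl (aStepN c) (pvWriteCol n c (fun i => l.getD i "") g, u)
      = (pvWriteCol n c (fun i => (rs.foldl lineAsc (l, u)).1.getD i "") g,
         (rs.foldl lineAsc (l, u)).2) := by
  intro rs
  induction rs with
  | nil => intro _ l u _; simp
  | cons r rs ih =>
    intro hmem l u hl
    have hr : r < n := hmem r (List.mem_cons_self)
    simp only [List.foldl_cons]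
    have hread : pvGet (pvWriteCol n c (fun i => l.getD i "") g) r c = l.getD r "" :=
      pvGet_pvWriteCol hg hc l hl r hr
    have hstep : aStepN c (pvWriteCol n c (fun i => l.getD i "") g, u) r
        = (pvWriteCol n c (fun i => (lineAsc (l, u) r).1.getD i "") g, (lineAsc (l, u) r).2) := by
      unfold aStepN lineAsc
      rw [hread]
      by_cases hO : l.getD r "" = "O"
      · simp only [hO, show (("O":String) == "O") = true from rfl, if_true]
        rw [pvSet_pvWriteCol hg hc l hl u "O"]
        by_cases hcnd : u ≠ r
        · simp only [if_pos hcnd]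
          rw [pvSet_pvWriteCol hg hc _ (by simp [hl]) r "."]
        · simp only [if_neg hcnd]
      · have h1 : (l.getD r "" == "O") = false := by simpa using hO
        by_cases hH : l.getD r "" = "#"
        · have h2 : (l.getD r "" == "#") = true := by simpa using hH
          simp only [h1, h2, Bool.false_eq_true, if_false, if_true]
        · have h2 : (l.getD r "" == "#") = false := by simpa using hH
          simp only [h1, h2, Bool.false_eq_true, if_false]
    rw [hstep]
    have hlen : (lineAsc (l, u) r).1.length = n := by
      unfold lineAsc; split_ifs <;> simp [hl]
    rw [ih (fun x hx => hmem x (List.mem_cons_of_mem _ hx)) _ _ hlen]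

-- same for A's south inner loop (descending, Int pointer)
lemma colFactorDesc {n m c : Nat} (g : List (List String)) (hg : GShape g n m) (hc : c < m) :
    ∀ (rs : List Nat), (∀ x ∈ rs, x < n) → ∀ (l : List String) (d : Int), l.length = n →
    rs.foldl (aStepS c) (pvWriteCol n c (fun i => l.getD i "") g, d)
      = (pvWriteCol n c (fun i => (rs.foldl lineDesc (l, d)).1.getD i "") g,
         (rs.foldl lineDesc (l, d)).2) := by
  intro rs
  induction rs with
  | nil => intro _ l d _; simp
  | cons r rs ih =>
    intro hmem l d hl
    have hr : r < n := hmem r (List.mem_cons_self)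
    simp only [List.foldl_cons]
    have hread : pvGet (pvWriteCol n c (fun i => l.getD i "") g) r c = l.getD r "" :=
      pvGet_pvWriteCol hg hc l hl r hr
    have hstep : aStepS c (pvWriteCol n c (fun i => l.getD i "") g, d) r
        = (pvWriteCol n c (fun i => (lineDesc (l, d) r).1.getD i "") g, (lineDesc (l, d) r).2) := by
      unfold aStepS lineDesc
      rw [hread]
      by_cases hO : l.getD r "" = "O"
      · simp only [hO, show (("O":String) == "O") = true from rfl, if_true]
        rw [pvSet_pvWriteCol hg hc l hl d.toNat "O"]
        by_cases hcnd : d ≠ (r : Int)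
        · simp only [if_pos hcnd]
          rw [pvSet_pvWriteCol hg hc _ (by simp [hl]) r "."]
        · simp only [if_neg hcnd]
      · have h1 : (l.getD r "" == "O") = false := by simpa using hO
        by_cases hH : l.getD r "" = "#"
        · have h2 : (l.getD r "" == "#") = true := by simpa using hH
          simp only [h1, h2, Bool.false_eq_true, if_false, if_true]
        · have h2 : (l.getD r "" == "#") = false := by simpa using hH
          simp only [h1, h2, Bool.false_eq_true, if_false]
    rw [hstep]
    have hlen : (lineDesc (l, d) r).1.length = n := by
      unfold lineDesc; split_ifs <;> simp [hl]
    rw [ih (fun x hx => hmem x (List.mem_cons_of_mem _ hx)) _ _ hlen]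
-- ---------- row-level factoring ----------
lemma pvGet_row_set (g : List (List String)) (r c : Nat) (ρ : List String) (h : r < g.length) :
    pvGet (g.set r ρ) r c = ρ.getD c "" := by
  unfold pvGet
  rw [pv_getD_set_self _ _ _ _ h]

lemma pvSet_row_set (g : List (List String)) (r c : Nat) (ρ : List String) (v : String)
    (h : r < g.length) :
    pvSet (g.set r ρ) r c v = g.set r (ρ.set c v) := by
  unfold pvSet
  rw [pv_getD_set_self _ _ _ _ h, List.set_set]

lemma rowFactorAsc {r : Nat} (g : List (List String)) (hr : r < g.length) :
    ∀ (cs : List Nat) (ρ : List String) (u : Nat),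
    cs.foldl (aStepW r) (g.set r ρ, u)
      = (g.set r (cs.foldl lineAsc (ρ, u)).1, (cs.foldl lineAsc (ρ, u)).2) := by
  intro cs
  induction cs with
  | nil => intro ρ u; simp
  | cons c cs ih =>
    intro ρ u
    simp only [List.foldl_cons]
    have hstep : aStepW r (g.set r ρ, u) c
        = (g.set r (lineAsc (ρ, u) c).1, (lineAsc (ρ, u) c).2) := by
      unfold aStepW lineAsc
      rw [pvGet_row_set g r c ρ hr]
      by_cases hO : ρ.getD c "" = "O"
      · simp only [hO, show (("O":String) == "O") = true from rfl, if_true]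
        rw [pvSet_row_set g r u ρ "O" hr]
        by_cases hcnd : u ≠ c
        · simp only [if_pos hcnd]
          rw [pvSet_row_set g r c _ "." hr]
        · simp only [if_neg hcnd]
      · have h1 : (ρ.getD c "" == "O") = false := by simpa using hO
        by_cases hH : ρ.getD c "" = "#"
        · have h2 : (ρ.getD c "" == "#") = true := by simpa using hH
          simp only [h1, h2, Bool.false_eq_true, if_false, if_true]
        · have h2 : (ρ.getD c "" == "#") = false := by simpa using hH
          simp only [h1, h2, Bool.false_eq_true, if_false]
    rw [hstep, ih]

lemma rowFactorDesc {r : Nat} (g : List (List String)) (hr : r < g.length) :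
    ∀ (cs : List Nat) (ρ : List String) (d : Int),
    cs.foldl (aStepE r) (g.set r ρ, d)
      = (g.set r (cs.foldl lineDesc (ρ, d)).1, (cs.foldl lineDesc (ρ, d)).2) := by
  intro cs
  induction cs with
  | nil => intro ρ d; simp
  | cons c cs ih =>
    intro ρ d
    simp only [List.foldl_cons]
    have hstep : aStepE r (g.set r ρ, d) c
        = (g.set r (lineDesc (ρ, d) c).1, (lineDesc (ρ, d) c).2) := by
      unfold aStepE lineDesc
      rw [pvGet_row_set g r c ρ hr]
      by_cases hO : ρ.getD c "" = "O"
      · simp only [hO, show (("O":String) == "O") = true from rfl, if_true]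
        rw [pvSet_row_set g r d.toNat ρ "O" hr]
        by_cases hcnd : d ≠ (c : Int)
        · simp only [if_pos hcnd]
          rw [pvSet_row_set g r c _ "." hr]
        · simp only [if_neg hcnd]
      · have h1 : (ρ.getD c "" == "O") = false := by simpa using hO
        by_cases hH : ρ.getD c "" = "#"
        · have h2 : (ρ.getD c "" == "#") = true := by simpa using hH
          simp only [h1, h2, Bool.false_eq_true, if_false, if_true]
        · have h2 : (ρ.getD c "" == "#") = false := by simpa using hH
          simp only [h1, h2, Bool.false_eq_true, if_false]
    rw [hstep, ih]

-- B's write-back loop on a row is a row replacement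
lemma pvWriteRow_set (r : Nat) (v : Nat → String) (g : List (List String))
    (hr : r < g.length) :
    ∀ (cs : List Nat) (ρ : List String),
    cs.foldl (fun g c => pvSet g r c (v c)) (g.set r ρ)
      = g.set r (cs.foldl (fun ρ c => ρ.set c (v c)) ρ) := by
  intro cs
  induction cs with
  | nil => intro ρ; simp
  | cons c cs ih =>
    intro ρ
    simp only [List.foldl_cons]
    rw [pvSet_row_set g r c ρ (v c) hr, ih]

lemma pvWriteRow_eq (mm r : Nat) (v : Nat → String) (g : List (List String))
    (hr : r < g.length) :
    pvWriteRow mm r v g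
      = g.set r ((List.range mm).foldl (fun ρ c => ρ.set c (v c)) (g.getD r [])) := by
  unfold pvWriteRow
  conv_lhs => rw [show g = g.set r (g.getD r []) from (pv_set_getD_self g r [] hr).symm]
  rw [pvWriteRow_set r v g hr (List.range mm) (g.getD r [])]

-- writing values into the first k cells of a row
lemma overwrite_prefix (v : Nat → String) : ∀ (k : Nat) (ρ : List String), k ≤ ρ.length →
    (List.range k).foldl (fun ρ c => ρ.set c (v c)) ρ = (List.range k).map v ++ ρ.drop k := by
  intro k
  induction k with
  | zero => intro ρ _; simp
  | succ k ih =>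
    intro ρ hk
    rw [List.range_succ, List.foldl_append, List.foldl_cons, List.foldl_nil, ih ρ (by omega)]
    rw [List.set_append_right _ _ (by simp)]
    simp only [List.length_map, List.length_range, Nat.sub_self]
    have hd : ρ.drop k = ρ[k] :: ρ.drop (k+1) := List.drop_eq_getElem_cons (by omega)
    rw [hd, List.set_cons_zero, List.map_append]
    simp [List.append_assoc]

-- generic outer loop: pointwise-equal steps preserving an invariant give equal folds
lemma foldl_congr_inv (P : List (List String) → Prop) (xs : List Nat)
    (fA fB : List (List String) → Nat → List (List String))
    (hstep : ∀ g x, P g → x ∈ xs → fA g x = fB g x)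
    (hinv : ∀ g x, P g → x ∈ xs → P (fB g x)) :
    ∀ g, P g → xs.foldl fA g = xs.foldl fB g ∧ P (xs.foldl fB g) := by
  induction xs with
  | nil => intro g hP; exact ⟨rfl, hP⟩
  | cons x xs ih =>
    intro g hP
    simp only [List.foldl_cons]
    rw [hstep g x hP (List.mem_cons_self)]
    exact ih (fun g y hPg hy => hstep g y hPg (List.mem_cons_of_mem _ hy))
             (fun g y hPg hy => hinv g y hPg (List.mem_cons_of_mem _ hy))
             (fB g x) (hinv g x hP (List.mem_cons_self))
lemma GShape_pvWriteRow {g : List (List String)} {n m : Nat} (hg : GShape g n m)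
    (mm r : Nat) (v : Nat → String) : GShape (pvWriteRow mm r v g) n m := by
  unfold pvWriteRow
  generalize List.range mm = cs
  induction cs generalizing g with
  | nil => exact hg
  | cons c cs ih => exact ih (GShape_pvSet hg r c (v c))

-- base grid as a written-back column, for seeding the factoring lemmas
lemma pvWriteCol_read' {g : List (List String)} {n m c : Nat} (hg : GShape g n m) (hc : c < m) :
    g = pvWriteCol n c (fun i => (pvReadCol n c g).getD i "") g := by
  have h1 : pvWriteCol n c (fun i => (pvReadCol n c g).getD i "") g
      = pvWriteCol n c (fun i => pvGet g i c) g := by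
    apply pvWriteCol_congr
    intro r hr
    unfold pvReadCol
    exact PySem.List.getD_map_range _ _ _ _ hr
  rw [h1, pvWriteCol_read hg hc]

-- ===== the four passes, one line at a time =====
lemma northStep_eq {n m : Nat} (g : List (List String)) (hg : GShape g n m) (c : Nat) (hc : c < m) :
    ((List.range n).foldl (aStepN c) (g, 0)).1
      = pvWriteCol n c (fun r => (pvTilt (pvReadCol n c g)).getD r "") g := by
  have hl : (pvReadCol n c g).length = n := by simp [pvReadCol]
  conv_lhs => rw [pvWriteCol_read' hg hc]
  rw [colFactorAsc g hg hc (List.range n) (fun x hx => List.mem_range.mp hx)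
        (pvReadCol n c g) 0 hl]
  dsimp only
  rw [asc_result (pvReadCol n c g) n (by omega)]
  rw [List.take_of_length_le (by omega), List.drop_of_length_le (by omega)]
  simp

lemma southStep_eq {n m : Nat} (g : List (List String)) (hg : GShape g n m) (c : Nat) (hc : c < m) :
    (((List.range n).reverse).foldl (aStepS c) (g, (n : Int) - 1)).1
      = pvWriteCol n c
          (fun r => (pvTilt (((List.range n).reverse).map (fun r => pvGet g r c))).getD (n - 1 - r) "") g := by
  have hl : (pvReadCol n c g).length = n := by simp [pvReadCol]
  conv_lhs => rw [pvWriteCol_read' hg hc]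
  rw [colFactorDesc g hg hc ((List.range n).reverse)
        (fun x hx => List.mem_range.mp (List.mem_reverse.mp hx)) (pvReadCol n c g) ((n : Int) - 1) hl]
  dsimp only
  rw [desc_result (pvReadCol n c g) n hl]
  have hrev : ((List.range n).reverse).map (fun r => pvGet g r c) = (pvReadCol n c g).reverse := by
    unfold pvReadCol
    rw [List.map_reverse]
  rw [hrev]
  apply pvWriteCol_congr
  intro r hr
  rw [pv_getD_reverse _ _ _ (by rw [pvTilt_length, List.length_reverse, hl]; omega)]
  congr 1
  rw [pvTilt_length, List.length_reverse, hl]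

lemma westStep_eq {n m : Nat} (g : List (List String)) (hg : GShape g n m) (r : Nat) (hr : r < n) :
    ((List.range m).foldl (aStepW r) (g, 0)).1
      = pvWriteRow m r (fun c => (pvTilt ((List.range m).map (fun c => pvGet g r c))).getD c "") g := by
  have hrg : r < g.length := by rw [hg.1]; exact hr
  have hρ : m ≤ (g.getD r []).length := hg.2 r hr
  conv_lhs => rw [show g = g.set r (g.getD r []) from (pv_set_getD_self g r [] hrg).symm]
  rw [rowFactorAsc g hrg (List.range m) (g.getD r []) 0]
  dsimp only
  rw [asc_result (g.getD r []) m hρ]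
  rw [pvWriteRow_eq m r _ g hrg, overwrite_prefix _ m (g.getD r []) hρ]
  have hrow : (List.range m).map (fun c => pvGet g r c) = (g.getD r []).take m := by
    simp only [pvGet]
    exact pv_map_range_getD _ m hρ
  rw [hrow]
  have hmap : (List.range m).map (fun c => (pvTilt ((g.getD r []).take m)).getD c "")
      = pvTilt ((g.getD r []).take m) :=
    pv_map_eq_of_getD (pvTilt ((g.getD r []).take m)) m _
      (by rw [pvTilt_length, List.length_take]; omega) (fun i hi => rfl)
  rw [hmap]

lemma eastStep_eq {n m : Nat} (g : List (List String)) (hg : GShape g n m) (r : Nat) (hr : r < n) :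
    (((List.range m).reverse).foldl (aStepE r) (g, (m : Int) - 1)).1
      = pvWriteRow m r
          (fun c => (pvTilt (((List.range m).reverse).map (fun c => pvGet g r c))).getD (m - 1 - c) "") g := by
  have hrg : r < g.length := by rw [hg.1]; exact hr
  have hρ : m ≤ (g.getD r []).length := hg.2 r hr
  conv_lhs => rw [show g = g.set r (g.getD r []) from (pv_set_getD_self g r [] hrg).symm]
  rw [rowFactorDesc g hrg ((List.range m).reverse) (g.getD r []) ((m : Int) - 1)]
  dsimp only
  have hda := desc_append m ((List.range m).reverse)
      (fun x hx => List.mem_range.mp (List.mem_reverse.mp hx))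
      ((g.getD r []).take m) ((g.getD r []).drop m) ((m : Int) - 1)
      (by rw [List.length_take]; omega) (le_refl _)
  rw [List.take_append_drop] at hda
  rw [hda]
  dsimp only
  rw [desc_result ((g.getD r []).take m) m (by rw [List.length_take]; omega)]
  rw [pvWriteRow_eq m r _ g hrg, overwrite_prefix _ m (g.getD r []) hρ]
  have hrowrev : ((List.range m).reverse).map (fun c => pvGet g r c)
      = ((g.getD r []).take m).reverse := by
    simp only [pvGet]
    rw [List.map_reverse, pv_map_range_getD _ m hρ]
  rw [hrowrev]
  have hmap : (List.range m).map
        (fun c => (pvTilt (((g.getD r []).take m).reverse)).getD (m - 1 - c) "")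
      = (pvTilt (((g.getD r []).take m).reverse)).reverse := by
    apply pv_map_eq_of_getD (pvTilt (((g.getD r []).take m).reverse)).reverse m _
      (by rw [List.length_reverse, pvTilt_length, List.length_reverse, List.length_take]; omega)
    intro i hi
    rw [pv_getD_reverse _ _ _
          (by rw [pvTilt_length, List.length_reverse, List.length_take]; omega)]
    congr 1
    rw [pvTilt_length, List.length_reverse, List.length_take]
    omega
  rw [hmap]
-- ===== VERDICT (by name: the statement is the Claim_ definition above) =====
theorem apply_cycle_spec : Claim_equal_apply_cycle := by
  intro g _hdom hpre
  unfold Spec_apply_cycle apply_cycle apply_cycle_alt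
  dsimp only
  obtain ⟨-, hall⟩ := hpre
  have hshape : GShape g g.length (g.getD 0 []).length := by
    refine ⟨rfl, fun i hi => ?_⟩
    rw [List.getD_eq_getElem _ _ hi]
    exact hall _ (List.getElem_mem hi)
  obtain ⟨e1, s1⟩ := foldl_congr_inv (fun h => GShape h g.length (g.getD 0 []).length)
      (List.range (g.getD 0 []).length)
      (fun h col => ((List.range g.length).foldl (aStepN col) (h, 0)).1)
      (fun h c => pvWriteCol g.length c
        (fun r => (pvTilt (pvReadCol g.length c h)).getD r "") h)
      (fun h c hP hc => northStep_eq h hP c (List.mem_range.mp hc))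
      (fun h c hP _ => GShape_pvWriteCol hP _ _ _) g hshape
  rw [e1]
  generalize hG1 : (List.range (g.getD 0 []).length).foldl
      (fun h c => pvWriteCol g.length c
        (fun r => (pvTilt (pvReadCol g.length c h)).getD r "") h) g = G1 at *
  obtain ⟨e2, s2⟩ := foldl_congr_inv (fun h => GShape h g.length (g.getD 0 []).length)
      (List.range g.length)
      (fun h row => ((List.range (g.getD 0 []).length).foldl (aStepW row) (h, 0)).1)
      (fun h r => pvWriteRow (g.getD 0 []).length r
        (fun c => (pvTilt ((List.range (g.getD 0 []).length).map
          (fun c => pvGet h r c))).getD c "") h)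
      (fun h r hP hrr => westStep_eq h hP r (List.mem_range.mp hrr))
      (fun h r hP _ => GShape_pvWriteRow hP _ _ _) G1 s1
  rw [e2]
  generalize hG2 : (List.range g.length).foldl
      (fun h r => pvWriteRow (g.getD 0 []).length r
        (fun c => (pvTilt ((List.range (g.getD 0 []).length).map
          (fun c => pvGet h r c))).getD c "") h) G1 = G2 at *
  obtain ⟨e3, s3⟩ := foldl_congr_inv (fun h => GShape h g.length (g.getD 0 []).length)
      (List.range (g.getD 0 []).length)
      (fun h col => (((List.range g.length).reverse).foldl (aStepS col)
        (h, (g.length : Int) - 1)).1)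
      (fun h c => pvWriteCol g.length c
        (fun r => (pvTilt (((List.range g.length).reverse).map
          (fun r => pvGet h r c))).getD (g.length - 1 - r) "") h)
      (fun h c hP hc => southStep_eq h hP c (List.mem_range.mp hc))
      (fun h c hP _ => GShape_pvWriteCol hP _ _ _) G2 s2
  rw [e3]
  generalize hG3 : (List.range (g.getD 0 []).length).foldl
      (fun h c => pvWriteCol g.length c
        (fun r => (pvTilt (((List.range g.length).reverse).map
          (fun r => pvGet h r c))).getD (g.length - 1 - r) "") h) G2 = G3 at *
  obtain ⟨e4, _s4⟩ := foldl_congr_inv (fun h => GShape h g.length (g.getD 0 []).length)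
      (List.range g.length)
      (fun h row => (((List.range (g.getD 0 []).length).reverse).foldl (aStepE row)
        (h, ((g.getD 0 []).length : Int) - 1)).1)
      (fun h r => pvWriteRow (g.getD 0 []).length r
        (fun c => (pvTilt (((List.range (g.getD 0 []).length).reverse).map
          (fun c => pvGet h r c))).getD ((g.getD 0 []).length - 1 - c) "") h)
      (fun h r hP hrr => eastStep_eq h hP r (List.mem_range.mp hrr))
      (fun h r hP _ => GShape_pvWriteRow hP _ _ _) G3 s3
  rw [e4]
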